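-- pv_equiv track=rewrite | github.com/JBreitenbr/fCC-Daily-Coding-Challenge | 04-2026.py | get_last_letter
-- ===== SOURCE A (Python) =====
-- def get_last_letter(s):
--     l=sorted([el.lower() for el in s if el.isalpha()])[-1]
--     u=l.upper()
--     if not u in s:
--         return l
--     elif not l in s:
--         return u
--     else:
--         return s[min(s.index(u),s.index(l))]
-- ===== SOURCE B (Python) =====
-- def get_last_letter(s):
--     target = sorted([c.lower() for c in s if c.isalpha()])[-1]
--     for c in s:
--         if c.lower() == target:
--             return c
-- ===== Notes on version B (the rewrite author's own statement) =====
-- stated objective: simpler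
-- what changed: Replaces A's three upper/lower membership branches plus min(s.index(u), s.index(l)) with a single left-to-right scan returning the first character whose lowercase form equals the maximal letter.
import Mathlib
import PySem

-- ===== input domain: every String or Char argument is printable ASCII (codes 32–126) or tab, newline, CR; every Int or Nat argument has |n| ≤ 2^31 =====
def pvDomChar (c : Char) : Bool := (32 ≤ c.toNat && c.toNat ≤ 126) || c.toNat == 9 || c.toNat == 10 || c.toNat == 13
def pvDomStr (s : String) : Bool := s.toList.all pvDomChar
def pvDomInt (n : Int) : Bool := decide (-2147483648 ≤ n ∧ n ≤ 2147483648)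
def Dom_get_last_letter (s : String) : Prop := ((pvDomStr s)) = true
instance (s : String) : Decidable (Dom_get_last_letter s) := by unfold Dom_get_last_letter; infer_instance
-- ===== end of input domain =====

-- B (objective: simpler): one left-to-right scan returning the first character whose lowercase form
-- is the maximal letter, replacing A's upper/lower membership branches and min-of-indices computation.

-- ===== PORT A =====
def get_last_letter (s : String) : String :=
  match PySem.List.pyGet?
      (PySem.List.sorted ((s.toList.filter (fun el => PySem.Chars.isalpha el)).map
        (fun el => PySem.Chars.lowerChar el)) (fun x => x) false) (-1) with
  | none => ""  -- [-1] raises IndexError (no alphabetic character); excluded by Pre_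
  | some l =>
    if !(PySem.Chars.isIn [PySem.Chars.upperChar l] s.toList) then String.ofList [l]
    else if !(PySem.Chars.isIn [l] s.toList) then String.ofList [PySem.Chars.upperChar l]
    else
      match PySem.List.pyGet? s.toList
          (min (PySem.Chars.find s.toList [PySem.Chars.upperChar l])
               (PySem.Chars.find s.toList [l])) with
      | none => ""  -- unreachable: both cases occur in s
      | some c => String.ofList [c]

-- ===== PORT B =====
def get_last_letter_alt (s : String) : String :=
  match PySem.List.pyGet?
      (PySem.List.sorted ((s.toList.filter (fun c => PySem.Chars.isalpha c)).map
        (fun c => PySem.Chars.lowerChar c)) (fun x => x) false) (-1) with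
  | none => ""  -- [-1] raises IndexError (no alphabetic character); excluded by Pre_
  | some target =>
    match s.toList.find? (fun c => PySem.Chars.lowerChar c == target) with
    | some c => String.ofList [c]
    | none => ""  -- unreachable when an alphabetic character exists

-- ===== PRECONDITION & SPEC =====
-- Pre_ excludes exactly the inputs with no alphabetic character, on which A's `sorted(...)[-1]`
-- raises IndexError (B raises IndexError there too).
def Pre_get_last_letter (s : String) : Prop :=
  s.toList.any (fun c => PySem.Chars.isalpha c) = true
instance (s : String) : Decidable (Pre_get_last_letter s) := by
  unfold Pre_get_last_letter; infer_instance
def pvWitness_get_last_letter : String := "Hello World"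
def Spec_get_last_letter (s : String) (out : String) : Prop := out = get_last_letter_alt s
instance (s : String) (out : String) : Decidable (Spec_get_last_letter s out) := by
  unfold Spec_get_last_letter; infer_instance

-- ===== CLAIM (what is proved, stated in full; the proofs are below) =====
def Claim_equal_get_last_letter : Prop := ∀ (s : String), Dom_get_last_letter s → Pre_get_last_letter s → Spec_get_last_letter s (get_last_letter s)

-- ===== LEMMAS AND PROOFS =====

lemma pv_char_eq_of_toNat (c d : Char) (h : c.toNat = d.toNat) : c = d := by
  have := congrArg Char.ofNat h
  simpa [Char.ofNat_toNat] using this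

lemma pv_toNat_ofNat (n : Nat) (h : n ≤ 122) : (Char.ofNat n).toNat = n := by
  rw [Char.toNat_ofNat, if_pos (Or.inl (by omega))]

lemma pv_isupper_iff (c : Char) : PySem.Chars.isupper c = true ↔ 65 ≤ c.toNat ∧ c.toNat ≤ 90 := by
  unfold PySem.Chars.isupper
  rw [Bool.and_eq_true, decide_eq_true_iff, decide_eq_true_iff, Char.le_def, Char.le_def,
      UInt32.le_iff_toNat_le, UInt32.le_iff_toNat_le]
  exact Iff.rfl

lemma pv_islower_iff (c : Char) : PySem.Chars.islower c = true ↔ 97 ≤ c.toNat ∧ c.toNat ≤ 122 := by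
  unfold PySem.Chars.islower
  rw [Bool.and_eq_true, decide_eq_true_iff, decide_eq_true_iff, Char.le_def, Char.le_def,
      UInt32.le_iff_toNat_le, UInt32.le_iff_toNat_le]
  exact Iff.rfl

lemma pv_alpha_lower_range (c : Char) (h : PySem.Chars.isalpha c = true) :
    97 ≤ (PySem.Chars.lowerChar c).toNat ∧ (PySem.Chars.lowerChar c).toNat ≤ 122 := by
  unfold PySem.Chars.isalpha at h
  unfold PySem.Chars.lowerChar
  cases hup : PySem.Chars.isupper c with
  | true =>
    rw [if_pos rfl]
    have := (pv_isupper_iff c).mp hup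
    rw [pv_toNat_ofNat _ (by omega)]
    omega
  | false =>
    have hl : PySem.Chars.islower c = true := by rw [hup] at h; simpa using h
    rw [if_neg (by simp)]
    exact (pv_islower_iff c).mp hl

lemma pv_upperChar_toNat (t : Char) (ht : 97 ≤ t.toNat ∧ t.toNat ≤ 122) :
    (PySem.Chars.upperChar t).toNat = t.toNat - 32 := by
  unfold PySem.Chars.upperChar
  rw [if_pos ((pv_islower_iff t).mpr ht), pv_toNat_ofNat _ (by omega)]

lemma pv_lower_eq_iff (t c : Char) (ht : 97 ≤ t.toNat ∧ t.toNat ≤ 122) :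
    PySem.Chars.lowerChar c = t ↔ (c = t ∨ c = PySem.Chars.upperChar t) := by
  have hut := pv_upperChar_toNat t ht
  unfold PySem.Chars.lowerChar
  by_cases hu : PySem.Chars.isupper c = true
  · rw [if_pos hu]
    have hr := (pv_isupper_iff c).mp hu
    constructor
    · intro h
      have := congrArg Char.toNat h
      rw [pv_toNat_ofNat _ (by omega)] at this
      right
      exact pv_char_eq_of_toNat _ _ (by omega)
    · rintro (rfl | rfl)
      · exact absurd hr (by omega)
      · exact pv_char_eq_of_toNat _ _ (by rw [pv_toNat_ofNat _ (by omega)]; omega)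
  · rw [if_neg hu]
    constructor
    · intro h; exact Or.inl h
    · rintro (rfl | rfl)
      · rfl
      · exact absurd ((pv_isupper_iff _).mpr (by rw [hut]; omega)) hu

lemma pv_isIn_singleton (a : Char) (l : List Char) :
    PySem.Chars.isIn [a] l = true ↔ a ∈ l := by
  rw [PySem.Chars.isIn_iff_infix]
  exact List.singleton_infix_iff a l

lemma pv_singleton_prefix (a : Char) (d : List Char) : [a] <+: d ↔ d.head? = some a := by
  cases d with
  | nil => simp
  | cons x xs =>
    constructor
    · rintro ⟨t, ht⟩
      simp only [List.singleton_append] at ht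
      cases ht
      rfl
    · intro h
      simp only [List.head?_cons, Option.some.injEq] at h
      exact ⟨xs, by simp [h]⟩

lemma pv_singleton_prefix_drop (l : List Char) (a : Char) (i : Nat) :
    [a] <+: l.drop i ↔ l[i]? = some a := by
  rw [pv_singleton_prefix, List.head?_drop]

lemma pv_find_singleton_spec (l : List Char) (a : Char) (h : a ∈ l) :
    ∃ n : Nat, PySem.Chars.find l [a] = (n : Int) ∧ l[n]? = some a ∧
      ∀ i < n, l[i]? ≠ some a := by
  have hinf : [a] <:+: l := (List.singleton_infix_iff a l).mpr h
  have hnn : 0 ≤ PySem.Chars.find l [a] := (PySem.Chars.find_nonneg_iff l [a]).mpr hinf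
  obtain ⟨hpre, hmin⟩ := PySem.Chars.find_spec hnn
  refine ⟨(PySem.Chars.find l [a]).toNat, by omega,
    (pv_singleton_prefix_drop _ _ _).mp hpre, ?_⟩
  intro i hi hsome
  exact hmin i hi ((pv_singleton_prefix_drop _ _ _).mpr hsome)

lemma pv_find?_at (l : List Char) (p : Char → Bool) (m : Nat) (hm : l[m]?.isSome)
    (hp : ∀ c, l[m]? = some c → p c = true)
    (hmin : ∀ j, j < m → ∀ c, l[j]? = some c → p c = false) :
    l.find? p = l[m]? := by
  induction l generalizing m with
  | nil => simp at hm
  | cons x xs ih =>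
    cases m with
    | zero =>
      have hx : p x = true := hp x (by simp)
      simp [List.find?_cons_of_pos hx]
    | succ k =>
      have hx : p x = false := hmin 0 (Nat.succ_pos k) x (by simp)
      rw [List.find?_cons_of_neg (by simp [hx])]
      simpa using ih k (by simpa using hm) (fun c hc => hp c (by simpa using hc))
        (fun j hj c hc => hmin (j+1) (by omega) c (by simpa using hc))

lemma pv_min_branch (l : List Char) (a b : Char) (ha : a ∈ l) (hb : b ∈ l) :
    PySem.List.pyGet? l (min (PySem.Chars.find l [a]) (PySem.Chars.find l [b])) =
      l.find? (fun c => c == a || c == b) := by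
  obtain ⟨na, hfa, hga, hma⟩ := pv_find_singleton_spec l a ha
  obtain ⟨nb, hfb, hgb, hmb⟩ := pv_find_singleton_spec l b hb
  rw [hfa, hfb]
  have hminc : min ((na : Int)) ((nb : Int)) = ((min na nb : Nat) : Int) := by omega
  rw [hminc, PySem.List.pyGet?_natCast]
  symm
  apply pv_find?_at
  · rcases Nat.le_total na nb with hle | hle
    · rw [min_eq_left hle, hga]; simp
    · rw [min_eq_right hle, hgb]; simp
  · intro c hc
    rcases Nat.le_total na nb with hle | hle
    · rw [min_eq_left hle, hga] at hc
      cases hc; simp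
    · rw [min_eq_right hle, hgb] at hc
      cases hc; simp
  · intro j hj c hc
    have h1 : c ≠ a := fun h => hma j (by omega) (h ▸ hc)
    have h2 : c ≠ b := fun h => hmb j (by omega) (h ▸ hc)
    simp [h1, h2]

-- ===== VERDICT (by name: the statement is the Claim_ definition above) =====
theorem get_last_letter_spec : Claim_equal_get_last_letter := by
  intro s _ hpre
  unfold Pre_get_last_letter at hpre
  unfold Spec_get_last_letter get_last_letter get_last_letter_alt
  set cs := s.toList with hcs
  obtain ⟨c0, hc0mem, hc0alpha⟩ := List.any_eq_true.mp hpre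
  set ms := (cs.filter (fun el => PySem.Chars.isalpha el)).map
    (fun el => PySem.Chars.lowerChar el) with hms
  have hmem : PySem.Chars.lowerChar c0 ∈ ms := by
    rw [hms]
    exact List.mem_map_of_mem (List.mem_filter.mpr ⟨hc0mem, hc0alpha⟩)
  have hne : PySem.List.sorted ms (fun x => x) false ≠ [] := by
    intro h
    rw [PySem.List.sorted_eq_nil_iff] at h
    rw [h] at hmem
    exact List.not_mem_nil hmem
  obtain ⟨t, hlast⟩ := Option.isSome_iff_exists.mp (List.getLast?_isSome.mpr hne)
  have hget : PySem.List.pyGet? (PySem.List.sorted ms (fun x => x) false) (-1) = some t := by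
    rw [PySem.List.pyGet?_neg_one, hlast]
  simp only [hget]
  have htm : t ∈ ms := by
    have := List.mem_of_getLast? hlast
    rwa [PySem.List.mem_sorted] at this
  obtain ⟨w, hwmem, hwt⟩ := List.mem_map.mp (by rw [hms] at htm; exact htm)
  have hwalpha : PySem.Chars.isalpha w = true := (List.mem_filter.mp hwmem).2
  have hwcs : w ∈ cs := (List.mem_filter.mp hwmem).1
  have ht : 97 ≤ t.toNat ∧ t.toNat ≤ 122 := by
    rw [← hwt]; exact pv_alpha_lower_range w hwalpha
  have hpred : (fun c => PySem.Chars.lowerChar c == t) =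
      (fun c => c == t || c == PySem.Chars.upperChar t) := by
    funext c
    by_cases h : PySem.Chars.lowerChar c = t
    · rcases (pv_lower_eq_iff t c ht).mp h with rfl | rfl <;> simp [h]
    · have hn1 : c ≠ t := fun hh => h ((pv_lower_eq_iff t c ht).mpr (Or.inl hh))
      have hn2 : c ≠ PySem.Chars.upperChar t :=
        fun hh => h ((pv_lower_eq_iff t c ht).mpr (Or.inr hh))
      rw [beq_eq_false_iff_ne.mpr h, beq_eq_false_iff_ne.mpr hn1, beq_eq_false_iff_ne.mpr hn2]
      rfl
  rw [hpred]
  by_cases hucs : PySem.Chars.isIn [PySem.Chars.upperChar t] cs = true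
  · have humem : PySem.Chars.upperChar t ∈ cs := (pv_isIn_singleton _ cs).mp hucs
    rw [if_neg (by rw [hucs]; simp)]
    by_cases htcs : PySem.Chars.isIn [t] cs = true
    · have htmem : t ∈ cs := (pv_isIn_singleton t cs).mp htcs
      rw [if_neg (by rw [htcs]; simp)]
      rw [pv_min_branch cs (PySem.Chars.upperChar t) t humem htmem]
      have hcomm : cs.find? (fun c => c == PySem.Chars.upperChar t || c == t) =
          cs.find? (fun c => c == t || c == PySem.Chars.upperChar t) := by
        congr 1
        funext x
        exact Bool.or_comm _ _
      rw [hcomm]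
      have hsome : (cs.find? (fun c => c == t || c == PySem.Chars.upperChar t)).isSome := by
        rw [List.find?_isSome]
        exact ⟨t, htmem, by simp⟩
      obtain ⟨c, hc⟩ := Option.isSome_iff_exists.mp hsome
      rw [hc]
    · have htnmem : t ∉ cs := fun h => htcs ((pv_isIn_singleton t cs).mpr h)
      rw [if_pos (by rw [Bool.not_eq_true] at htcs; rw [htcs]; rfl)]
      have hsome : (cs.find? (fun c => c == t || c == PySem.Chars.upperChar t)).isSome := by
        rw [List.find?_isSome]
        exact ⟨PySem.Chars.upperChar t, humem, by simp⟩
      obtain ⟨c, hc⟩ := Option.isSome_iff_exists.mp hsome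
      have hcp := List.find?_some hc
      have hcmem := List.mem_of_find?_eq_some hc
      have hcu : c = PySem.Chars.upperChar t := by
        rcases (by simpa using hcp : c = t ∨ c = PySem.Chars.upperChar t) with h | h
        · exact absurd (h ▸ hcmem) htnmem
        · exact h
      rw [hc, hcu]
  · have hunmem : PySem.Chars.upperChar t ∉ cs :=
      fun h => hucs ((pv_isIn_singleton _ cs).mpr h)
    rw [if_pos (by rw [Bool.not_eq_true] at hucs; rw [hucs]; rfl)]
    have htmem : t ∈ cs := by
      rcases (pv_lower_eq_iff t w ht).mp hwt with h | h
      · rwa [← h]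
      · exact absurd (h ▸ hwcs) hunmem
    have hsome : (cs.find? (fun c => c == t || c == PySem.Chars.upperChar t)).isSome := by
      rw [List.find?_isSome]
      exact ⟨t, htmem, by simp⟩
    obtain ⟨c, hc⟩ := Option.isSome_iff_exists.mp hsome
    have hcp := List.find?_some hc
    have hcmem := List.mem_of_find?_eq_some hc
    have hct : c = t := by
      rcases (by simpa using hcp : c = t ∨ c = PySem.Chars.upperChar t) with h | h
      · exact h
      · exact absurd (h ▸ hcmem) hunmem
    rw [hc, hct]
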